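-- pv_equiv track=rewrite | github.com/iamarunavo/AdvancedPythonProgramming | Day10/sumlist.py | int_add
-- ===== SOURCE A (Python) =====
-- def int_add(x: str, y: str) -> str:
--     if len(x) < len(y):
--         padding = "0" * (len(y) - len(x))
--         x = padding + x
--     elif len(x) > len(y):
--         padding = "0" * (len(x) - len(y))
--         y = padding + y
--
--     carry = 0
--     result = ""
--
--     for i in range(len(x) - 1, -1, -1):
--         digitSum = int(x[i]) + int(y[i]) + carry
--         result = str(digitSum % 10) + result
--         carry = digitSum // 10
--
--     if carry > 0:
--         result = str(carry) + result
--
--     return result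
-- ===== SOURCE B (Python) =====
-- _DIGITS = "0123456789"
--
--
-- def _value(s: str) -> int:
--     v = 0
--     for c in s:
--         v = v * 10 + _DIGITS.index(c)
--     return v
--
--
-- def int_add(x: str, y: str) -> str:
--     width = max(len(x), len(y))
--     if width == 0:
--         return ""
--     return str(_value(x) + _value(y)).zfill(width)
-- ===== Notes on version B (the rewrite author's own statement) =====
-- stated objective: simpler
-- what changed: A's schoolbook digit-by-digit addition with explicit padding, carry propagation and string prepending is replaced by evaluating each string to an integer (Horner, digit value via its index in '0123456789'), adding once, and formatting with str(total).zfill(max(len(x), len(y))).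
import Mathlib
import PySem

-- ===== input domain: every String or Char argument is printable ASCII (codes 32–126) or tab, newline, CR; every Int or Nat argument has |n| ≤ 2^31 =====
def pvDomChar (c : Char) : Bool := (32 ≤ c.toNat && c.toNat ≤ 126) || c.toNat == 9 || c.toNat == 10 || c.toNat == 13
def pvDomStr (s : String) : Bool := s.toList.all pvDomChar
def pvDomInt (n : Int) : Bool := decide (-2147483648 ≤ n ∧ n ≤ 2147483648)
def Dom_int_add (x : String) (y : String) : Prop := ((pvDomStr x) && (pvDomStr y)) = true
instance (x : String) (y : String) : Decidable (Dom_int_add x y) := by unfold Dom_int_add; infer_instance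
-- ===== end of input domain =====

-- B replaces A's digit-by-digit carry loop by numeric evaluation of both strings,
-- one integer addition, and zero-padded decimal formatting (objective: simpler).


-- ===== PORT A =====
-- int(x[i]) on the one-character string x[i]; Python raises ValueError on a
-- non-digit character — exactly those inputs are excluded by Pre_int_add,
-- so the .getD 0 default is never reached under the claim.
def int_add_digit (c : Char) : Int := (PySem.Int.ofChars? [c]).getD 0

-- the loop 'for i in range(len(x)-1, -1, -1)' over the (equal-length, padded)
-- strings: descending index i = iteration over the reversed list of pairs
-- (x[i], y[i]); state (carry, result), result prepended each step as in A
def int_add_loop (pairs : List (Char × Char)) (carry : Int) (result : List Char) :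
    Int × List Char :=
  match pairs with
  | [] => (carry, result)
  | (a, b) :: rest =>
      let digitSum := int_add_digit a + int_add_digit b + carry
      int_add_loop rest (PySem.Int.floordiv digitSum 10)
        (PySem.Int.toChars (PySem.Int.mod digitSum 10) ++ result)

def int_add (x : String) (y : String) : String :=
  let xs0 := x.toList
  let ys0 := y.toList
  -- if len(x) < len(y): x = "0"*(len(y)-len(x)) + x  elif len(x) > len(y): …
  let p :=
    if xs0.length < ys0.length then (List.replicate (ys0.length - xs0.length) '0' ++ xs0, ys0)
    else if xs0.length > ys0.length then (xs0, List.replicate (xs0.length - ys0.length) '0' ++ ys0)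
    else (xs0, ys0)
  let r := int_add_loop ((p.1.zip p.2).reverse) 0 []
  -- if carry > 0: result = str(carry) + result
  if r.1 > 0 then String.ofList (PySem.Int.toChars r.1 ++ r.2) else String.ofList r.2

-- ===== PORT B =====
-- _DIGITS = "0123456789"
def int_add_DIGITS : List Char := ['0','1','2','3','4','5','6','7','8','9']

-- helper _value: v = 0; for c in s: v = v*10 + _DIGITS.index(c)
-- (_DIGITS.index(c) raises ValueError on a non-digit c, where PySem.Chars.find gives -1;
--  Python B returns no value there, so the port's value is irrelevant on those inputs)
def int_add_value (s : List Char) : Int :=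
  s.foldl (fun v c => v * 10 + PySem.Chars.find int_add_DIGITS [c]) 0

def int_add_alt (x : String) (y : String) : String :=
  let width := max x.toList.length y.toList.length
  if width = 0 then ""
  else PySem.Str.zfill (PySem.Int.toStr (int_add_value x.toList + int_add_value y.toList))
        (width : Int)

-- ===== PRECONDITION & SPEC =====
-- Pre_ excludes exactly the inputs on which A raises: Python's int(x[i]) raises
-- ValueError whenever some character of x or y is not a decimal digit.
def Pre_int_add (x : String) (y : String) : Prop :=
  (x.toList.all PySem.Chars.isdigit && y.toList.all PySem.Chars.isdigit) = true
instance (x : String) (y : String) : Decidable (Pre_int_add x y) := by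
  unfold Pre_int_add; infer_instance

def pvWitness_int_add : String × String := ("12", "345")

def Spec_int_add (x : String) (y : String) (out : String) : Prop := out = int_add_alt x y
instance (x : String) (y : String) (out : String) : Decidable (Spec_int_add x y out) := by
  unfold Spec_int_add; infer_instance

-- ===== CLAIM (what is proved, stated in full; the proofs are below) =====
def Claim_equal_int_add : Prop :=
  ∀ (x : String) (y : String), Dom_int_add x y → Pre_int_add x y →
    Spec_int_add x y (int_add x y)

-- ===== LEMMAS AND PROOFS =====

-- Nat-valued Horner evaluation of a digit list (most significant first)
def pvValN (s : List Char) : Nat := s.foldl (fun v c => v * 10 + (c.toNat - 48)) 0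

-- least-significant-first combined value of a list of digit pairs
def pvS : List (Char × Char) → Nat
  | [] => 0
  | (a, b) :: t => (a.toNat - 48) + (b.toNat - 48) + 10 * pvS t

-- the k low decimal digits of m, most significant first
def pvRep : Nat → Nat → List Char
  | 0, _ => []
  | k + 1, m => pvRep k (m / 10) ++ [Nat.digitChar (m % 10)]

def pvIsDig (c : Char) : Prop := c ∈ ['0','1','2','3','4','5','6','7','8','9']

theorem pvIsDig_of_isdigit {c : Char} (h : PySem.Chars.isdigit c = true) : pvIsDig c := by
  simp only [PySem.Chars.isdigit, Bool.and_eq_true, decide_eq_true_eq] at h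
  obtain ⟨h1, h2⟩ := h
  rw [Char.le_def, UInt32.le_iff_toNat_le] at h1 h2
  have hc : ∀ (d : Char), c.toNat = d.toNat → c = d := fun d hv =>
    Char.ext (UInt32.toNat_inj.mp hv)
  have hd : c.toNat = 48 ∨ c.toNat = 49 ∨ c.toNat = 50 ∨ c.toNat = 51 ∨
      c.toNat = 52 ∨ c.toNat = 53 ∨ c.toNat = 54 ∨ c.toNat = 55 ∨
      c.toNat = 56 ∨ c.toNat = 57 := by
    simp at h1 h2
    omega
  unfold pvIsDig
  rcases hd with h | h | h | h | h | h | h | h | h | h <;>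
    [rw [hc '0' h]; rw [hc '1' h]; rw [hc '2' h]; rw [hc '3' h]; rw [hc '4' h];
     rw [hc '5' h]; rw [hc '6' h]; rw [hc '7' h]; rw [hc '8' h]; rw [hc '9' h]] <;>
    decide

theorem pvIsDig_bounds {c : Char} (h : pvIsDig c) : 48 ≤ c.toNat ∧ c.toNat ≤ 57 := by
  unfold pvIsDig at h; fin_cases h <;> decide

theorem pvDigit_eq {c : Char} (h : pvIsDig c) :
    int_add_digit c = ((c.toNat - 48 : Nat) : Int) := by
  unfold pvIsDig at h; fin_cases h <;> decide

theorem pvLen_rep (k m : Nat) : (pvRep k m).length = k := by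
  induction k generalizing m with
  | zero => rfl
  | succ k ih => simp [pvRep, ih]

theorem pvRep_zero (k : Nat) : pvRep k 0 = List.replicate k '0' := by
  induction k with
  | zero => rfl
  | succ k ih =>
      show pvRep k (0 / 10) ++ [Nat.digitChar (0 % 10)] = _
      rw [Nat.zero_div, ih, List.replicate_succ' (n := k)]
      rfl

theorem pvRep_head (k m : Nat) :
    pvRep (k + 1) m = Nat.digitChar (m / 10 ^ k % 10) :: pvRep k m := by
  induction k generalizing m with
  | zero => simp [pvRep]
  | succ k ih =>
      show pvRep (k + 1) (m / 10) ++ [Nat.digitChar (m % 10)] = _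
      rw [ih (m / 10)]
      show _ = Nat.digitChar (m / 10 ^ (k + 1) % 10) :: (pvRep k (m / 10) ++ [Nat.digitChar (m % 10)])
      rw [Nat.div_div_eq_div_mul, ← pow_succ']
      rfl

-- the carry loop computes the zero-padded low digits plus the final carry
theorem pvLoop_spec (p : List (Char × Char))
    (hd : ∀ q ∈ p, pvIsDig q.1 ∧ pvIsDig q.2) (carry : Nat) (res : List Char) :
    int_add_loop p (carry : Int) res =
      ((((pvS p + carry) / 10 ^ p.length : Nat) : Int), pvRep p.length (pvS p + carry) ++ res) := by
  induction p generalizing carry res with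
  | nil => simp [int_add_loop, pvS, pvRep]
  | cons q t ih =>
      obtain ⟨a, b⟩ := q
      have ha := (hd (a, b) (by simp)).1
      have hb := (hd (a, b) (by simp)).2
      have ha' := pvIsDig_bounds ha
      have hb' := pvIsDig_bounds hb
      have hm : int_add_digit a + int_add_digit b + (carry : Int)
          = (((a.toNat - 48) + (b.toNat - 48) + carry : Nat) : Int) := by
        rw [pvDigit_eq ha, pvDigit_eq hb]; push_cast; ring
      set m : Nat := (a.toNat - 48) + (b.toNat - 48) + carry with hmdef
      have hfd : PySem.Int.floordiv ((m : Nat) : Int) 10 = ((m / 10 : Nat) : Int) := by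
        exact_mod_cast PySem.Int.floordiv_natCast m 10
      have hmod : PySem.Int.mod ((m : Nat) : Int) 10 = ((m % 10 : Nat) : Int) := by
        exact_mod_cast PySem.Int.mod_natCast m 10
      have htc : PySem.Int.toChars (((m % 10 : Nat) : Int)) = [Nat.digitChar (m % 10)] := by
        rw [PySem.Int.toChars, if_neg (by omega), Int.toNat_natCast]
        exact Nat.toDigits_of_lt_base (Nat.mod_lt _ (by norm_num))
      have step : int_add_loop ((a, b) :: t) (carry : Int) res
          = int_add_loop t (PySem.Int.floordiv (int_add_digit a + int_add_digit b + carry) 10)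
              (PySem.Int.toChars (PySem.Int.mod (int_add_digit a + int_add_digit b + carry) 10) ++ res) := rfl
      rw [step, hm, hfd, hmod, htc,
        ih (fun q hq => hd q (List.mem_cons_of_mem _ hq)) (m / 10)]
      have hM : pvS ((a, b) :: t) + carry = m + 10 * pvS t := by
        simp only [pvS]; omega
      have h1 : pvS t + m / 10 = (pvS ((a, b) :: t) + carry) / 10 := by
        rw [hM, Nat.add_comm m (10 * pvS t), Nat.mul_add_div (by norm_num)]
      have h2 : m % 10 = (pvS ((a, b) :: t) + carry) % 10 := by
        rw [hM]; omega
      refine Prod.ext ?_ ?_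
      · show (((pvS t + m / 10) / 10 ^ t.length : Nat) : Int) = _
        rw [h1, List.length_cons, Nat.div_div_eq_div_mul, ← pow_succ']
      · show pvRep t.length (pvS t + m / 10) ++ ([Nat.digitChar (m % 10)] ++ res) = _
        rw [h1, h2, List.length_cons]
        show _ = pvRep t.length ((pvS ((a, b) :: t) + carry) / 10)
            ++ [Nat.digitChar ((pvS ((a, b) :: t) + carry) % 10)] ++ res
        rw [List.append_assoc]

theorem pvHorner_shift (s : List Char) (a : Nat) :
    s.foldl (fun v c => v * 10 + (c.toNat - 48)) a = a * 10 ^ s.length + pvValN s := by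
  induction s generalizing a with
  | nil => simp [pvValN]
  | cons c t ih =>
      simp only [List.foldl_cons, pvValN, List.length_cons]
      rw [ih, ih (0 * 10 + (c.toNat - 48))]
      ring

theorem pvValN_cons (c : Char) (t : List Char) :
    pvValN (c :: t) = (c.toNat - 48) * 10 ^ t.length + pvValN t := by
  show List.foldl _ (0 * 10 + (c.toNat - 48)) t = _
  rw [pvHorner_shift]
  ring_nf

theorem pvValN_lt (s : List Char) (h : ∀ c ∈ s, pvIsDig c) : pvValN s < 10 ^ s.length := by
  induction s with
  | nil => simp [pvValN]
  | cons c t ih =>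
      have hb := pvIsDig_bounds (h c (by simp))
      have ht := ih (fun c hc => h c (List.mem_cons_of_mem _ hc))
      rw [pvValN_cons, List.length_cons, pow_succ]
      have hc9 : (c.toNat - 48) ≤ 9 := by omega
      nlinarith [pow_pos (by norm_num : (0:ℕ) < 10) t.length]

theorem pvValN_pad (k : Nat) (s : List Char) :
    pvValN (List.replicate k '0' ++ s) = pvValN s := by
  have h0 : (List.replicate k '0').foldl (fun v c => v * 10 + (c.toNat - 48)) 0 = 0 := by
    induction k with
    | zero => rfl
    | succ k ih => simpa [List.replicate_succ] using ih
  show List.foldl _ 0 _ = _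
  rw [List.foldl_append, h0]
  rfl

theorem pvS_append_singleton (u : List (Char × Char)) (a b : Char) :
    pvS (u ++ [(a, b)]) = pvS u + ((a.toNat - 48) + (b.toNat - 48)) * 10 ^ u.length := by
  induction u with
  | nil => simp [pvS]
  | cons q t ih =>
      obtain ⟨c, d⟩ := q
      simp only [List.cons_append, pvS, ih, List.length_cons]
      ring

theorem pvS_zip_reverse (xs ys : List Char) (h : xs.length = ys.length) :
    pvS ((xs.zip ys).reverse) = pvValN xs + pvValN ys := by
  induction xs generalizing ys with
  | nil =>
      have : ys = [] := List.eq_nil_of_length_eq_zero h.symm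
      simp [this, pvS, pvValN]
  | cons x xt ih =>
      cases ys with
      | nil => simp at h
      | cons y yt =>
          have hlen2 : yt.length = xt.length := by
            simpa using h.symm
          have hlen : ((xt.zip yt).reverse).length = xt.length := by
            simp [List.length_zip, hlen2]
          simp only [List.zip_cons_cons, List.reverse_cons]
          rw [pvS_append_singleton, ih yt (by simpa using h)]
          rw [pvValN_cons, pvValN_cons, hlen, hlen2]
          ring

theorem pvFind_digit {c : Char} (h : pvIsDig c) :
    PySem.Chars.find int_add_DIGITS [c] = ((c.toNat - 48 : Nat) : Int) := by
  unfold pvIsDig at h; fin_cases h <;> decide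

theorem pvValue_eq (s : List Char) (h : ∀ c ∈ s, pvIsDig c) :
    int_add_value s = ((pvValN s : Nat) : Int) := by
  have key : ∀ (t : List Char), (∀ c ∈ t, pvIsDig c) → ∀ (a : Nat),
      t.foldl (fun v c => v * 10 + PySem.Chars.find int_add_DIGITS [c]) ((a : Nat) : Int)
        = ((t.foldl (fun v c => v * 10 + (c.toNat - 48)) a : Nat) : Int) := by
    intro t
    induction t with
    | nil => intro _ a; rfl
    | cons c t ih =>
        intro hdig a
        have hb := pvIsDig_bounds (hdig c (by simp))
        simp only [List.foldl_cons]
        rw [pvFind_digit (hdig c (by simp))]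
        have hcast : ((a : Nat) : Int) * 10 + ((c.toNat - 48 : Nat) : Int)
            = (((a * 10 + (c.toNat - 48) : Nat)) : Int) := by push_cast; ring
        rw [hcast, ih (fun c hc => hdig c (List.mem_cons_of_mem _ hc))]
  simpa using key s h 0

theorem pvRep_eq_pad_toDigits (k m : Nat) (hk : 0 < k) (hm : m < 10 ^ k) :
    pvRep k m = List.replicate (k - (Nat.toDigits 10 m).length) '0' ++ Nat.toDigits 10 m := by
  induction k generalizing m with
  | zero => omega
  | succ k ih =>
      by_cases hsm : m < 10
      · rw [Nat.toDigits_of_lt_base hsm]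
        show pvRep k (m / 10) ++ [Nat.digitChar (m % 10)] = _
        rw [Nat.div_eq_of_lt hsm, Nat.mod_eq_of_lt hsm, pvRep_zero]
        rw [show k + 1 - ([m.digitChar] : List Char).length = k from rfl]
      · have hk0 : 0 < k := by
          by_contra hc
          have : k = 0 := by omega
          subst this
          simp only [Nat.zero_add, pow_one] at hm
          omega
        have hlt : m / 10 < 10 ^ k := by
          rw [Nat.div_lt_iff_lt_mul (by norm_num)]
          calc m < 10 ^ (k + 1) := hm
          _ = 10 ^ k * 10 := by rw [pow_succ]
        rw [Nat.toDigits_of_base_le (by norm_num) (by omega)]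
        show pvRep k (m / 10) ++ [Nat.digitChar (m % 10)] = _
        rw [ih (m / 10) hk0 hlt]
        have hL1 : 1 ≤ (Nat.toDigits 10 (m / 10)).length := Nat.length_toDigits_pos
        have hLk : (Nat.toDigits 10 (m / 10)).length ≤ k :=
          (Nat.length_toDigits_le_iff (by norm_num) hk0).2 hlt
        rw [List.append_assoc]
        congr 2
        rw [List.length_append, List.length_cons, List.length_nil]
        omega

theorem pvToDigits_carry (n M : Nat) (h1 : 10 ^ n ≤ M) (h2 : M < 2 * 10 ^ n) :
    Nat.toDigits 10 M = '1' :: pvRep n M := by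
  have h10 : 0 < 10 ^ n := pow_pos (by norm_num) n
  have hn : M < 10 ^ (n + 1) := by
    have : (10:Nat) ^ (n + 1) = 10 ^ n * 10 := pow_succ 10 n
    omega
  have hrep := pvRep_eq_pad_toDigits (n + 1) M (by omega) hn
  have hdiv : M / 10 ^ n = 1 := by
    have hlow : 1 ≤ M / 10 ^ n := (Nat.one_le_div_iff h10).2 h1
    have hhigh : M / 10 ^ n < 2 := Nat.div_lt_of_lt_mul (by omega)
    omega
  have hhead : pvRep (n + 1) M = '1' :: pvRep n M := by
    rw [pvRep_head, hdiv]
    rfl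
  have hLk : (Nat.toDigits 10 M).length ≤ n + 1 :=
    (Nat.length_toDigits_le_iff (by norm_num) (by omega)).2 hn
  have hpad : n + 1 - (Nat.toDigits 10 M).length = 0 := by
    by_contra hne
    have hh : (pvRep (n + 1) M).head? = some '0' := by
      rw [hrep]
      cases hcase : n + 1 - (Nat.toDigits 10 M).length with
      | zero => omega
      | succ j => simp [List.replicate_succ]
    rw [hhead] at hh
    simp at hh
  rw [hrep, hpad] at hhead
  simpa using hhead

theorem pvToChars_natCast (m : Nat) :
    PySem.Int.toChars ((m : Nat) : Int) = Nat.toDigits 10 m := by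
  rw [PySem.Int.toChars, if_neg (by omega), Int.toNat_natCast]

theorem pvZfill_digits (m : Nat) (w : Nat) :
    PySem.Chars.zfill (Nat.toDigits 10 m) (w : Int) =
      List.replicate (w - (Nat.toDigits 10 m).length) '0' ++ Nat.toDigits 10 m := by
  have hpos : 0 < (Nat.toDigits 10 m).length := Nat.length_toDigits_pos
  cases hd : Nat.toDigits 10 m with
  | nil => rw [hd] at hpos; simp at hpos
  | cons c rest =>
      have hc : c.isDigit = true :=
        Nat.isDigit_of_mem_toDigits (b := 10) (n := m) (by norm_num) (by norm_num)
          (by rw [hd]; simp)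
      rw [PySem.Chars.zfill.eq_def]
      by_cases hle : (w : Int) ≤ ((c :: rest : List Char).length : Int)
      · rw [if_pos hle]
        have hz : w - (c :: rest : List Char).length = 0 := by
          simp only [List.length_cons] at hle ⊢
          omega
        rw [hz]
        rfl
      · rw [if_neg hle]
        have hcs : ¬ (c = '+' ∨ c = '-') := by
          rintro (rfl | rfl) <;> revert hc <;> decide
        show (if c = '+' ∨ c = '-' then _ else _) = _
        rw [if_neg hcs]
        congr 2

-- the padded strings: equal lengths (= max), same values, still digit lists
theorem pvPad_facts (xs ys : List Char) (hx : ∀ c ∈ xs, pvIsDig c) (hy : ∀ c ∈ ys, pvIsDig c) :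
    let p := if xs.length < ys.length then (List.replicate (ys.length - xs.length) '0' ++ xs, ys)
      else if xs.length > ys.length then (xs, List.replicate (xs.length - ys.length) '0' ++ ys)
      else (xs, ys)
    p.1.length = max xs.length ys.length ∧ p.2.length = max xs.length ys.length ∧
      pvValN p.1 = pvValN xs ∧ pvValN p.2 = pvValN ys ∧
      (∀ c ∈ p.1, pvIsDig c) ∧ (∀ c ∈ p.2, pvIsDig c) := by
  intro p
  have hzero : pvIsDig '0' := by unfold pvIsDig; simp
  have hrep : ∀ (k : Nat) (s : List Char), (∀ c ∈ s, pvIsDig c) →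
      ∀ c ∈ List.replicate k '0' ++ s, pvIsDig c := by
    intro k s hs c hc
    rcases List.mem_append.mp hc with h | h
    · rw [List.eq_of_mem_replicate h]; exact hzero
    · exact hs c h
  unfold p
  split_ifs with h1 h2 <;>
    refine ⟨?_, ?_, ?_, ?_, ?_, ?_⟩ <;>
    simp_all [List.length_append, List.length_replicate, pvValN_pad] <;>
    first
    | omega
    | (intro c hc; first | exact hrep _ _ hx c hc | exact hrep _ _ hy c hc)

-- ===== VERDICT (by name: the statement is the Claim_ definition above) =====
theorem int_add_spec : Claim_equal_int_add := by
  intro x y _ hpre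
  rw [Pre_int_add, Bool.and_eq_true, List.all_eq_true, List.all_eq_true] at hpre
  obtain ⟨hx, hy⟩ := hpre
  unfold Spec_int_add
  have hx' : ∀ c ∈ x.toList, pvIsDig c := fun c hc => pvIsDig_of_isdigit (hx c hc)
  have hy' : ∀ c ∈ y.toList, pvIsDig c := fun c hc => pvIsDig_of_isdigit (hy c hc)
  set xs := x.toList with hxs
  set ys := y.toList with hys
  set p := if xs.length < ys.length then (List.replicate (ys.length - xs.length) '0' ++ xs, ys)
    else if xs.length > ys.length then (xs, List.replicate (xs.length - ys.length) '0' ++ ys)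
    else (xs, ys) with hp
  set n := max xs.length ys.length with hn
  obtain ⟨hl1, hl2, hv1, hv2, hd1, hd2⟩ := pvPad_facts xs ys hx' hy'
  rw [← hp] at hl1 hl2 hv1 hv2 hd1 hd2
  -- both ports, with their let-bindings expanded (definitional)
  have hA : int_add x y =
      (if (int_add_loop ((p.1.zip p.2).reverse) 0 []).1 > 0 then
        String.ofList (PySem.Int.toChars (int_add_loop ((p.1.zip p.2).reverse) 0 []).1
          ++ (int_add_loop ((p.1.zip p.2).reverse) 0 []).2)
      else String.ofList (int_add_loop ((p.1.zip p.2).reverse) 0 []).2) := rfl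
  have hB : int_add_alt x y =
      (if n = 0 then ""
       else PySem.Str.zfill (PySem.Int.toStr (int_add_value xs + int_add_value ys)) (n : Int)) := rfl
  rw [hA, hB]
  by_cases hn0 : n = 0
  · -- both strings empty
    have hx0 : xs = [] := List.eq_nil_of_length_eq_zero (by omega)
    have hy0 : ys = [] := List.eq_nil_of_length_eq_zero (by omega)
    have hpnil : p = ([], []) := by rw [hp, hx0, hy0]; simp
    rw [hpnil, if_pos hn0]
    rw [show int_add_loop ((([] : List Char).zip ([] : List Char)).reverse) 0 [] = (0, []) from rfl]
    rw [if_neg (by omega)]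
  · rw [if_neg hn0]
    have hzlen : (p.1.zip p.2).length = n := by
      rw [List.length_zip, hl1, hl2]; omega
    have hdig : ∀ q ∈ (p.1.zip p.2).reverse, pvIsDig q.1 ∧ pvIsDig q.2 := by
      intro q hq
      rw [List.mem_reverse] at hq
      exact ⟨hd1 _ (List.of_mem_zip hq).1, hd2 _ (List.of_mem_zip hq).2⟩
    set M : Nat := pvValN xs + pvValN ys with hM
    have hSM : pvS ((p.1.zip p.2).reverse) = M := by
      rw [pvS_zip_reverse p.1 p.2 (by omega), hv1, hv2]
    have hloop := pvLoop_spec ((p.1.zip p.2).reverse) hdig 0 []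
    rw [Nat.cast_zero] at hloop
    rw [hloop, List.length_reverse, hzlen, hSM, Nat.add_zero, List.append_nil]
    -- the value B computes
    have hval : int_add_value xs + int_add_value ys = ((M : Nat) : Int) := by
      rw [pvValue_eq xs hx', pvValue_eq ys hy', hM]; push_cast; ring
    rw [hval, PySem.Int.toStr]
    have hMlt : M < 2 * 10 ^ n := by
      have b1 := pvValN_lt xs hx'
      have b2 := pvValN_lt ys hy'
      have m1 : (10:Nat) ^ xs.length ≤ 10 ^ n := Nat.pow_le_pow_right (by norm_num) (by omega)
      have m2 : (10:Nat) ^ ys.length ≤ 10 ^ n := Nat.pow_le_pow_right (by norm_num) (by omega)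
      omega
    have htl : (String.ofList (PySem.Int.toChars ((M : Nat) : Int))).toList
        = Nat.toDigits 10 M := by
      rw [pvToChars_natCast]
      exact (String.ofList_eq.mp rfl).symm
    by_cases hcarry : 10 ^ n ≤ M
    · -- final carry 1: str(carry) is prepended by A; str(M) already has n+1 characters
      have hq : M / 10 ^ n = 1 := by
        have h10 : 0 < (10:Nat) ^ n := pow_pos (by norm_num) n
        have hlow : 1 ≤ M / 10 ^ n := (Nat.one_le_div_iff h10).2 hcarry
        have hhigh : M / 10 ^ n < 2 := Nat.div_lt_of_lt_mul (by omega)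
        omega
      rw [hq, if_pos (show ((1:Nat) : Int) > 0 by norm_num)]
      -- compare the two strings through their character lists
      rw [String.ofList_eq, PySem.Str.toList_zfill, htl, pvZfill_digits M n]
      rw [pvToDigits_carry n M hcarry hMlt]
      have hlen : ('1' :: pvRep n M).length = n + 1 := by simp [pvLen_rep]
      rw [hlen, show n - (n + 1) = 0 from by omega, List.replicate_zero, List.nil_append]
      rw [show PySem.Int.toChars ((1:Nat) : Int) = ['1'] from rfl]
      rfl
    · -- no final carry: str(M) has at most n characters, zfill pads to n
      have hlt : M < 10 ^ n := by omega
      rw [Nat.div_eq_of_lt hlt, if_neg (show ¬ ((0:Nat) : Int) > 0 by norm_num)]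
      rw [String.ofList_eq, PySem.Str.toList_zfill, htl, pvZfill_digits M n]
      exact pvRep_eq_pad_toDigits n M (by omega) hlt
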